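-- pv_equiv track=rewrite | github.com/saintrealchoi/Algorithm | Programmers/Level2/eat_the_ground.py | solution
-- ===== SOURCE A (Python) =====
-- def solution(land):
--     for i in range(1,len(land)):
--         a,b,c,d = land[i-1][0],land[i-1][1],land[i-1][2],land[i-1][3]
--         for j in range(4):
--             if j == 0:
--                 land[i][j] += max(b,c,d)
--             elif j == 1:
--                 land[i][j] += max(a,c,d)
--             elif j == 2:
--                 land[i][j] += max(a,b,d)
--             else:
--                 land[i][j] += max(a,b,c)
--
--     return max(land[len(land)-1])
-- ===== SOURCE B (Python) =====
-- def solution(land):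
--     for i in range(1, len(land)):
--         prev = land[i - 1][:4]
--         m1 = max(prev)
--         cnt = prev.count(m1)
--         m2 = max((v for v in prev if v < m1), default=m1)
--         for j in range(4):
--             land[i][j] += m2 if cnt == 1 and land[i - 1][j] == m1 else m1
--     return max(land[-1])
-- ===== Notes on version B (the rewrite author's own statement) =====
-- stated objective: alternative
-- what changed: B replaces A's four hard-coded max-of-the-other-three computations per row with a single scan of the previous row that precomputes its top-two summary (maximum, its multiplicity, second maximum) and then adds second-max only to the unique-maximum column.
import Mathlib
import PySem

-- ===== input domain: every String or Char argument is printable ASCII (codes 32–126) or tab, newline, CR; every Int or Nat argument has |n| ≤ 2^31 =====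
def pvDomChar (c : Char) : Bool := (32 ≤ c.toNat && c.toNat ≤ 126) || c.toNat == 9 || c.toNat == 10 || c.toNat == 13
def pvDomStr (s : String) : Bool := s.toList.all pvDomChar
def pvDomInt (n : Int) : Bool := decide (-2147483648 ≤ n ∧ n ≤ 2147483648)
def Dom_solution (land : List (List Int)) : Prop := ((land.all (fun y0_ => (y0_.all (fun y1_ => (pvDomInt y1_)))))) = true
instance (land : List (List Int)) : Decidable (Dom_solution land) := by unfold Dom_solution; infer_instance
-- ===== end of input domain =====

-- B replaces the four per-column max-of-three computations with a precomputed top-two summary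
-- (maximum, its multiplicity, second maximum) of the previous row.  Both A and B mutate `land`
-- in place in the same way in Python; the theorems below are about the return value.

-- ===== PORT A =====
def stepA (L : List (List Int)) (i : Int) : List (List Int) :=
  let prev := PySem.List.pyGetD L (i - 1) []
  let a := PySem.List.pyGetD prev 0 0
  let b := PySem.List.pyGetD prev 1 0
  let c := PySem.List.pyGetD prev 2 0
  let d := PySem.List.pyGetD prev 3 0
  let row := (PySem.List.pyRange 0 4 1).foldl (fun r j =>
    if j = 0 then r.set j.toNat (PySem.List.pyGetD r j 0 + max (max b c) d)
    else if j = 1 then r.set j.toNat (PySem.List.pyGetD r j 0 + max (max a c) d)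
    else if j = 2 then r.set j.toNat (PySem.List.pyGetD r j 0 + max (max a b) d)
    else r.set j.toNat (PySem.List.pyGetD r j 0 + max (max a b) c)) (PySem.List.pyGetD L i [])
  L.set i.toNat row

def solution (land : List (List Int)) : Int :=
  let final := (PySem.List.pyRange 1 (land.length : Int) 1).foldl stepA land
  -- max(land[len(land)-1]); Python raises on an empty list there — those inputs are outside Pre_
  PySem.List.maxD (PySem.List.pyGetD final ((final.length : Int) - 1) []) id 0

-- ===== PORT B =====
def stepB (L : List (List Int)) (i : Int) : List (List Int) :=
  let prevFull := PySem.List.pyGetD L (i - 1) []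
  let prev := PySem.List.slice prevFull none (some 4)     -- land[i-1][:4]
  let m1 := PySem.List.maxD prev id 0                     -- max(prev); raises on [] — outside Pre_
  let cnt := PySem.List.count prev m1
  let m2 := PySem.List.maxD (prev.filter (fun v => v < m1)) id m1
  let row := (PySem.List.pyRange 0 4 1).foldl (fun r j =>
    r.set j.toNat (PySem.List.pyGetD r j 0 +
      (if cnt = 1 ∧ PySem.List.pyGetD prevFull j 0 = m1 then m2 else m1))) (PySem.List.pyGetD L i [])
  L.set i.toNat row

def solution_alt (land : List (List Int)) : Int :=
  let final := (PySem.List.pyRange 1 (land.length : Int) 1).foldl stepB land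
  -- max(land[-1]); Python raises on an empty list there — those inputs are outside Pre_
  PySem.List.maxD (PySem.List.pyGetD final (-1) []) id 0

-- ===== PRECONDITION & SPEC =====
-- Pre_ excludes exactly the inputs on which A raises: the empty grid (IndexError at land[-1]),
-- a single empty row (ValueError from max([])), and, for two or more rows, any row shorter
-- than 4 (IndexError when reading/updating the four columns).
def Pre_solution (land : List (List Int)) : Prop :=
  land ≠ [] ∧ ((land.length = 1 ∧ land.getD 0 [] ≠ []) ∨ (2 ≤ land.length ∧ ∀ r ∈ land, 4 ≤ r.length))
instance (land : List (List Int)) : Decidable (Pre_solution land) := by unfold Pre_solution; infer_instance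

def pvWitness_solution : List (List Int) := [[1,2,3,4],[4,3,2,1],[1,1,1,1]]

def Spec_solution (land : List (List Int)) (out : Int) : Prop := out = solution_alt land
instance (land : List (List Int)) (out : Int) : Decidable (Spec_solution land out) := by unfold Spec_solution; infer_instance

-- ===== CLAIM (what is proved, stated in full; the proofs are below) =====
def Claim_equal_solution : Prop := ∀ (land : List (List Int)), Dom_solution land → Pre_solution land → Spec_solution land (solution land)

-- ===== LEMMAS AND PROOFS =====

lemma cnt_eq (a b c d m : Int) : PySem.List.count [a,b,c,d] m =
    (if a = m then 1 else 0) + ((if b = m then 1 else 0) + ((if c = m then 1 else 0) + (if d = m then 1 else 0))) := by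
  simp [PySem.List.count, List.count_cons]
  split_ifs <;> omega

lemma max3_eq (x y z w : Int) : PySem.List.maxD [x,y,z] id w = max (max x y) z := by
  cases hh : PySem.List.max? ([x,y,z] : List Int) id with
  | none => simp [PySem.List.max?_eq_none_iff] at hh
  | some m' =>
    have hmem := PySem.List.max?_mem hh
    have hub := PySem.List.max?_isMax hh
    have hx := hub x (by simp)
    have hy := hub y (by simp)
    have hz := hub z (by simp)
    simp only [PySem.List.maxD, hh, Option.getD, id] at *
    simp at hmem
    rcases hmem with e|e|e <;> omega

-- the top-two summary (max m, multiplicity, second max) of [a,b,c,d] reproduces each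
-- max-of-the-other-three
lemma key4 (a b c d : Int) (m : Int) (hm : PySem.List.max? [a,b,c,d] id = some m) :
    (max (max b c) d = if PySem.List.count [a,b,c,d] m = 1 ∧ a = m
        then PySem.List.maxD (([a,b,c,d] : List Int).filter (fun v => v < m)) id m else m) ∧
    (max (max a c) d = if PySem.List.count [a,b,c,d] m = 1 ∧ b = m
        then PySem.List.maxD (([a,b,c,d] : List Int).filter (fun v => v < m)) id m else m) ∧
    (max (max a b) d = if PySem.List.count [a,b,c,d] m = 1 ∧ c = m
        then PySem.List.maxD (([a,b,c,d] : List Int).filter (fun v => v < m)) id m else m) ∧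
    (max (max a b) c = if PySem.List.count [a,b,c,d] m = 1 ∧ d = m
        then PySem.List.maxD (([a,b,c,d] : List Int).filter (fun v => v < m)) id m else m) := by
  have hmem := PySem.List.max?_mem hm
  have hub := PySem.List.max?_isMax hm
  have ha := hub a (by simp)
  have hb := hub b (by simp)
  have hc := hub c (by simp)
  have hd := hub d (by simp)
  simp only [id] at ha hb hc hd
  simp at hmem
  refine ⟨?_, ?_, ?_, ?_⟩
  · by_cases h : PySem.List.count [a,b,c,d] m = 1 ∧ a = m
    · obtain ⟨h1, h2⟩ := h
      rw [if_pos ⟨h1, h2⟩, cnt_eq] at *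
      have hrest : b < m ∧ c < m ∧ d < m := by split_ifs at h1 <;> omega
      obtain ⟨e1, e2, e3⟩ := hrest
      have hfilter : (([a,b,c,d] : List Int).filter (fun v => v < m)) = [b,c,d] := by
        simp [List.filter, e1, e2, e3, h2]
      rw [hfilter, max3_eq]
    · rw [if_neg h]
      rcases not_and_or.mp h with h1 | h2
      · rw [cnt_eq] at h1
        split_ifs at h1 <;> rcases hmem with e|e|e|e <;> omega
      · rcases hmem with e|e|e|e <;> omega
  · by_cases h : PySem.List.count [a,b,c,d] m = 1 ∧ b = m
    · obtain ⟨h1, h2⟩ := h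
      rw [if_pos ⟨h1, h2⟩, cnt_eq] at *
      have hrest : a < m ∧ c < m ∧ d < m := by split_ifs at h1 <;> omega
      obtain ⟨e1, e2, e3⟩ := hrest
      have hfilter : (([a,b,c,d] : List Int).filter (fun v => v < m)) = [a,c,d] := by
        simp [List.filter, e1, e2, e3, h2]
      rw [hfilter, max3_eq]
    · rw [if_neg h]
      rcases not_and_or.mp h with h1 | h2
      · rw [cnt_eq] at h1
        split_ifs at h1 <;> rcases hmem with e|e|e|e <;> omega
      · rcases hmem with e|e|e|e <;> omega
  · by_cases h : PySem.List.count [a,b,c,d] m = 1 ∧ c = m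
    · obtain ⟨h1, h2⟩ := h
      rw [if_pos ⟨h1, h2⟩, cnt_eq] at *
      have hrest : a < m ∧ b < m ∧ d < m := by split_ifs at h1 <;> omega
      obtain ⟨e1, e2, e3⟩ := hrest
      have hfilter : (([a,b,c,d] : List Int).filter (fun v => v < m)) = [a,b,d] := by
        simp [List.filter, e1, e2, e3, h2]
      rw [hfilter, max3_eq]
    · rw [if_neg h]
      rcases not_and_or.mp h with h1 | h2
      · rw [cnt_eq] at h1
        split_ifs at h1 <;> rcases hmem with e|e|e|e <;> omega
      · rcases hmem with e|e|e|e <;> omega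
  · by_cases h : PySem.List.count [a,b,c,d] m = 1 ∧ d = m
    · obtain ⟨h1, h2⟩ := h
      rw [if_pos ⟨h1, h2⟩, cnt_eq] at *
      have hrest : a < m ∧ b < m ∧ c < m := by split_ifs at h1 <;> omega
      obtain ⟨e1, e2, e3⟩ := hrest
      have hfilter : (([a,b,c,d] : List Int).filter (fun v => v < m)) = [a,b,c] := by
        simp [List.filter, e1, e2, e3, h2]
      rw [hfilter, max3_eq]
    · rw [if_neg h]
      rcases not_and_or.mp h with h1 | h2
      · rw [cnt_eq] at h1
        split_ifs at h1 <;> rcases hmem with e|e|e|e <;> omega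
      · rcases hmem with e|e|e|e <;> omega

lemma pyRange04 : PySem.List.pyRange 0 4 1 = [0,1,2,3] := by decide

lemma step_eq (L : List (List Int)) (i : Int) (h : ∀ r ∈ L, 4 ≤ r.length) :
    stepA L i = stepB L i := by
  rcases hp : PySem.List.pyGet? L (i-1) with _ | p
  case none =>
    have hd : PySem.List.pyGetD L (i-1) [] = ([] : List Int) := by
      simp [PySem.List.pyGetD, hp]
    simp [stepA, stepB, hd, pyRange04, List.foldl, PySem.List.pyGetD_ofNat',
      PySem.List.slice_to, PySem.List.maxD, PySem.List.max?, PySem.List.count]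
  case some =>
    have hd : PySem.List.pyGetD L (i-1) [] = p := by simp [PySem.List.pyGetD, hp]
    have hp4 : 4 ≤ p.length := h p (PySem.List.mem_of_pyGet?_eq_some L hp)
    obtain ⟨a, b, c, d, rest, rfl⟩ : ∃ a b c d rest, p = a :: b :: c :: d :: rest := by
      rcases p with _ | ⟨a, _ | ⟨b, _ | ⟨c, _ | ⟨d, rest⟩⟩⟩⟩
      · simp at hp4
      · simp at hp4
      · simp at hp4
      · simp at hp4
      · exact ⟨a, b, c, d, rest, rfl⟩
    have htake : PySem.List.slice (a :: b :: c :: d :: rest) none (some 4) = [a,b,c,d] := by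
      rw [PySem.List.slice_to _ (by omega)]
      simp [List.take]
    rcases hmx : PySem.List.max? ([a,b,c,d] : List Int) id with _ | m
    · simp [PySem.List.max?_eq_none_iff] at hmx
    · have k := key4 a b c d m hmx
      simp [stepA, stepB, hd, htake, pyRange04, PySem.List.pyGetD_ofNat',
        PySem.List.maxD, hmx, k.1, k.2.1, k.2.2.1, k.2.2.2]

lemma stepB_len (L : List (List Int)) (i : Int) : (stepB L i).length = L.length := by
  simp [stepB]

lemma stepB_inv (L : List (List Int)) (i : Int) (hi : 1 ≤ i) (h : ∀ r ∈ L, 4 ≤ r.length) :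
    ∀ r ∈ stepB L i, 4 ≤ r.length := by
  intro r hr
  by_cases hlt : i.toNat < L.length
  · unfold stepB at hr
    rcases List.mem_or_eq_of_mem_set hr with hm | rfl
    · exact h r hm
    · have hrow : PySem.List.pyGetD L i [] = L[i.toNat] :=
        PySem.List.pyGetD_eq_getElem L [] (by omega) (by omega)
      simp [pyRange04, List.foldl, hrow]
      exact h _ (List.getElem_mem hlt)
  · unfold stepB at hr
    rw [List.set_eq_of_length_le (by omega)] at hr
    exact h r hr

lemma fold_eq (is : List Int) (L : List (List Int)) (his : ∀ j ∈ is, 1 ≤ j)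
    (h : ∀ r ∈ L, 4 ≤ r.length) : is.foldl stepA L = is.foldl stepB L := by
  induction is generalizing L with
  | nil => rfl
  | cons j js ih =>
    simp only [List.foldl]
    rw [step_eq L j h]
    exact ih _ (fun x hx => his x (by simp [hx])) (stepB_inv L j (his j (by simp)) h)

lemma fold_len (is : List Int) (L : List (List Int)) : (is.foldl stepB L).length = L.length := by
  induction is generalizing L with
  | nil => rfl
  | cons j js ih => simp only [List.foldl]; rw [ih, stepB_len]

lemma last_idx (xs : List (List Int)) (h : xs ≠ []) :
    PySem.List.pyGetD xs ((xs.length : Int) - 1) [] = PySem.List.pyGetD xs (-1) [] := by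
  have hlen : 1 ≤ xs.length := List.length_pos_of_ne_nil h
  simp only [PySem.List.pyGetD, PySem.List.pyGet?, PySem.List.pyIdx?]
  rw [if_pos (by omega), if_pos (by omega), if_neg (by omega), if_pos (by omega)]
  congr 3
  omega

-- ===== VERDICT (by name: the statement is the Claim_ definition above) =====
theorem solution_spec : Claim_equal_solution := by
  intro land _ hpre
  obtain ⟨hne, hcase⟩ := hpre
  unfold Spec_solution solution solution_alt
  rcases hcase with ⟨h1, _⟩ | ⟨h2, hrows⟩
  · rw [h1]
    rw [PySem.List.pyRange_one_eq_nil (by omega)]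
    simp only [List.foldl]
    rw [last_idx land hne]
  · rw [fold_eq _ _ (fun j hj => ((PySem.List.mem_pyRange_one).mp hj).1) hrows]
    have hfl : ((PySem.List.pyRange 1 (land.length : Int) 1).foldl stepB land).length = land.length :=
      fold_len _ _
    show PySem.List.maxD (PySem.List.pyGetD ((PySem.List.pyRange 1 (land.length : Int) 1).foldl stepB land)
        ((((PySem.List.pyRange 1 (land.length : Int) 1).foldl stepB land).length : Int) - 1) []) id 0 =
      PySem.List.maxD (PySem.List.pyGetD ((PySem.List.pyRange 1 (land.length : Int) 1).foldl stepB land) (-1) []) id 0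
    rw [last_idx _ (by intro e; rw [e] at hfl; simp at hfl; omega)]
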